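-- pv_equiv track=rewrite | github.com/0Rx3/TextEditor | Styling/Defaults.py | convert_decimal_to_alpha
-- ===== SOURCE A (Python) =====
-- def convert_decimal_to_alpha(num, lower=False):
--     res = ""
--     while num > 0:
--         if num >= 26:
--             res += "Z"
--             num -= 26
--         elif num >= 25:
--             res += "Y"
--             num -= 25
--         elif num >= 24:
--             res += "X"
--             num -= 24
--         elif num >= 23:
--             res += "W"
--             num -= 23
--         elif num >= 22:
--             res += "V"
--             num -= 22
--         elif num >= 21:
--             res += "U"
--             num -= 21
--         elif num >= 20:
--             res += "T"
--             num -= 20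
--         elif num >= 19:
--             res += "S"
--             num -= 19
--         elif num >= 18:
--             res += "R"
--             num -= 18
--         elif num >= 17:
--             res += "Q"
--             num -= 17
--         elif num >= 16:
--             res += "P"
--             num -= 16
--         elif num >= 15:
--             res += "O"
--             num -= 15
--         elif num >= 14:
--             res += "N"
--             num -= 14
--         elif num >= 13:
--             res += "M"
--             num -= 13
--         elif num >= 12:
--             res += "L"
--             num -= 12
--         elif num >= 11:
--             res += "K"
--             num -= 11
--         elif num >= 10:
--             res += "J"
--             num -= 10
--         elif num >= 9:
--             res += "I"
--             num -= 9
--         elif num >= 8: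
--             res += "H"
--             num -= 8
--         elif num >= 7:
--             res += "G"
--             num -= 7
--         elif num >= 6:
--             res += "F"
--             num -= 6
--         elif num >= 5:
--             res += "E"
--             num -= 5
--         elif num >= 4:
--             res += "D"
--             num -= 4
--         elif num >= 3:
--             res += "C"
--             num -= 3
--         elif num >= 2:
--             res += "B"
--             num -= 2
--         elif num >= 1:
--             num -= 1
--             res += "A"
--     if lower:
--         return res.lower()
--     else:
--         return res
-- ===== SOURCE B (Python) =====
-- def convert_decimal_to_alpha(num, lower=False):
--     if num <= 0:
--         res = ""
--     else:
--         q, r = divmod(num, 26)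
--         res = "Z" * q + (chr(ord("A") + r - 1) if r else "")
--     return res.lower() if lower else res
-- ===== Notes on version B (the rewrite author's own statement) =====
-- stated objective: faster
-- what changed: Replaces the 26-branch greedy subtraction loop with a single divmod: 'Z' repeated num//26 times plus one direct character for the residue.
import Mathlib
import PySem

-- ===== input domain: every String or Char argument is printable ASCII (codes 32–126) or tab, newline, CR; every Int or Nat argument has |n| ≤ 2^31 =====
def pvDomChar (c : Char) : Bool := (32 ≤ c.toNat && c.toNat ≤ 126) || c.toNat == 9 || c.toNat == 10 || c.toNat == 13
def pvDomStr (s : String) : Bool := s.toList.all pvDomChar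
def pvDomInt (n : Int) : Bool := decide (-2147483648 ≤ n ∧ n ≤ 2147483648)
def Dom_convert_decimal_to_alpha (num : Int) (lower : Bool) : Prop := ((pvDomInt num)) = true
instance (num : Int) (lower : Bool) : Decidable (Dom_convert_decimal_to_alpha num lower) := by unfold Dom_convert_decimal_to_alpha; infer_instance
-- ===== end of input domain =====

-- B replaces A's 26-branch greedy subtraction loop by a single divmod and direct character construction.

-- ===== PORT A =====
-- the while-loop of A: greedy 26-way branch chain, accumulating res (as List Char)
def convertLoopA : Nat → Int → List Char → List Char
  | 0, _, res => res
  | fuel + 1, num, res =>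
    if num > 0 then
    if num ≥ 26 then convertLoopA fuel (num - 26) (res ++ ['Z'])
    else if num ≥ 25 then convertLoopA fuel (num - 25) (res ++ ['Y'])
    else if num ≥ 24 then convertLoopA fuel (num - 24) (res ++ ['X'])
    else if num ≥ 23 then convertLoopA fuel (num - 23) (res ++ ['W'])
    else if num ≥ 22 then convertLoopA fuel (num - 22) (res ++ ['V'])
    else if num ≥ 21 then convertLoopA fuel (num - 21) (res ++ ['U'])
    else if num ≥ 20 then convertLoopA fuel (num - 20) (res ++ ['T'])
    else if num ≥ 19 then convertLoopA fuel (num - 19) (res ++ ['S'])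
    else if num ≥ 18 then convertLoopA fuel (num - 18) (res ++ ['R'])
    else if num ≥ 17 then convertLoopA fuel (num - 17) (res ++ ['Q'])
    else if num ≥ 16 then convertLoopA fuel (num - 16) (res ++ ['P'])
    else if num ≥ 15 then convertLoopA fuel (num - 15) (res ++ ['O'])
    else if num ≥ 14 then convertLoopA fuel (num - 14) (res ++ ['N'])
    else if num ≥ 13 then convertLoopA fuel (num - 13) (res ++ ['M'])
    else if num ≥ 12 then convertLoopA fuel (num - 12) (res ++ ['L'])
    else if num ≥ 11 then convertLoopA fuel (num - 11) (res ++ ['K'])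
    else if num ≥ 10 then convertLoopA fuel (num - 10) (res ++ ['J'])
    else if num ≥ 9 then convertLoopA fuel (num - 9) (res ++ ['I'])
    else if num ≥ 8 then convertLoopA fuel (num - 8) (res ++ ['H'])
    else if num ≥ 7 then convertLoopA fuel (num - 7) (res ++ ['G'])
    else if num ≥ 6 then convertLoopA fuel (num - 6) (res ++ ['F'])
    else if num ≥ 5 then convertLoopA fuel (num - 5) (res ++ ['E'])
    else if num ≥ 4 then convertLoopA fuel (num - 4) (res ++ ['D'])
    else if num ≥ 3 then convertLoopA fuel (num - 3) (res ++ ['C'])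
    else if num ≥ 2 then convertLoopA fuel (num - 2) (res ++ ['B'])
    else if num ≥ 1 then convertLoopA fuel (num - 1) (res ++ ['A'])
    else res
    else res

def convert_decimal_to_alpha (num : Int) (lower : Bool) : String :=
  let res := convertLoopA num.toNat num []
  if lower then PySem.Str.lower (String.mk res) else String.mk res

-- ===== PORT B =====
def convert_decimal_to_alpha_alt (num : Int) (lower : Bool) : String :=
  let res : List Char :=
    if num ≤ 0 then []
    else
      let q := PySem.Int.floordiv num 26
      let r := PySem.Int.mod num 26
      List.replicate q.toNat 'Z' ++ (if r ≠ 0 then [Char.ofNat (65 + r.toNat - 1)] else [])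
  if lower then PySem.Str.lower (String.mk res) else String.mk res

-- ===== PRECONDITION & SPEC =====
def Spec_convert_decimal_to_alpha (num : Int) (lower : Bool) (out : String) : Prop := out = convert_decimal_to_alpha_alt num lower
instance (num : Int) (lower : Bool) (out : String) : Decidable (Spec_convert_decimal_to_alpha num lower out) := by unfold Spec_convert_decimal_to_alpha; infer_instance

-- ===== CLAIM (what is proved, stated in full; the proofs are below) =====
def Claim_equal_convert_decimal_to_alpha : Prop := ∀ (num : Int) (lower : Bool), Dom_convert_decimal_to_alpha num lower → Spec_convert_decimal_to_alpha num lower (convert_decimal_to_alpha num lower)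

-- ===== LEMMAS AND PROOFS =====

-- closed form of the loop result for a nonnegative argument
def alphaCore (n : Nat) : List Char :=
  List.replicate (n / 26) 'Z' ++ (if n % 26 ≠ 0 then [Char.ofNat (64 + n % 26)] else [])

theorem convertLoopA_nonpos (fuel : Nat) (num : Int) (res : List Char) (h : num ≤ 0) :
    convertLoopA fuel num res = res := by
  cases fuel with
  | zero => rfl
  | succ fuel => rw [convertLoopA, if_neg (by omega)]

theorem convertLoopA_eq (fuel : Nat) : ∀ (n : Nat), n ≤ fuel → ∀ res : List Char,
    convertLoopA fuel (n : Int) res = res ++ alphaCore n := by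
  induction fuel with
  | zero =>
    intro n hn res
    have hn0 : n = 0 := by omega
    subst hn0
    simp [convertLoopA, alphaCore]
  | succ fuel ih =>
    intro n hn res
    rcases Nat.lt_or_ge n 26 with h26 | h26
    · rcases Nat.eq_zero_or_pos n with h0 | h0
      · subst h0
        rw [convertLoopA_nonpos _ _ _ (by omega)]
        simp [alphaCore]
      · interval_cases n <;>
          norm_num [convertLoopA, alphaCore] <;>
          rw [convertLoopA_nonpos _ _ _ (by omega)]
    · have h1 : ((n : Int) > 0) := by omega
      have h2 : ((n : Int) ≥ 26) := by omega
      rw [convertLoopA, if_pos h1, if_pos h2]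
      have hc : (n : Int) - 26 = ((n - 26 : Nat) : Int) := by omega
      rw [hc, ih (n - 26) (by omega)]
      have hdiv : n / 26 = (n - 26) / 26 + 1 := by omega
      have hmod : n % 26 = (n - 26) % 26 := by omega
      simp [alphaCore, hdiv, hmod, List.replicate_succ]

-- ===== VERDICT (by name: the statement is the Claim_ definition above) =====

theorem convert_decimal_to_alpha_spec : Claim_equal_convert_decimal_to_alpha := by
  intro num lower _
  unfold Spec_convert_decimal_to_alpha convert_decimal_to_alpha convert_decimal_to_alpha_alt
  have key : convertLoopA num.toNat num [] = (if num ≤ 0 then ([] : List Char) else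
      List.replicate (PySem.Int.floordiv num 26).toNat 'Z' ++
        (if PySem.Int.mod num 26 ≠ 0 then [Char.ofNat (65 + (PySem.Int.mod num 26).toNat - 1)] else [])) := by
    by_cases hle : num ≤ 0
    · rw [if_pos hle, convertLoopA_nonpos _ _ _ hle]
    · rw [if_neg hle]
      obtain ⟨m, rfl⟩ : ∃ m : Nat, num = (m : Int) := ⟨num.toNat, by omega⟩
      rw [Int.toNat_natCast, convertLoopA_eq m m le_rfl []]
      have hq : PySem.Int.floordiv ((m : Nat) : Int) 26 = ((m / 26 : Nat) : Int) := by
        exact_mod_cast PySem.Int.floordiv_natCast m 26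
      have hr : PySem.Int.mod ((m : Nat) : Int) 26 = ((m % 26 : Nat) : Int) := by
        exact_mod_cast PySem.Int.mod_natCast m 26
      simp only [hq, hr, Int.toNat_natCast, List.nil_append, alphaCore]
      congr 1
      by_cases h : m % 26 = 0
      · simp [h]
      · simp only [ne_eq, Int.natCast_eq_zero, h, not_false_eq_true, if_pos]
        congr 2
        omega
  rw [key]
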